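-- pv_equiv track=rewrite | github.com/LeviJunior21/AnaliseTecnicaAlgoritmos | terceiro_modulo/dynamic_dice_combinations.py | dice_combinations2
-- ===== SOURCE A (Python) =====
-- def dice_combinations2(n):
--     array = [0] * n
--
--     for i in range(n):
--         if (i <= 5):
--             array[i] = 2 ** i
--         else:
--             array[i] = (array[i - 1] + array[i - 2] + array[i - 3] + array[i - 4] + array[i - 5] + array[i - 6]) % (10 ** 9 + 7)
--
--     return array[-1]
-- ===== SOURCE B (Python) =====
-- def dice_combinations2(n):
--     P = 10 ** 9 + 7
--     M = [
--         [0, 1, 0, 0, 0, 0],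
--         [0, 0, 1, 0, 0, 0],
--         [0, 0, 0, 1, 0, 0],
--         [0, 0, 0, 0, 1, 0],
--         [0, 0, 0, 0, 0, 1],
--         [1, 1, 1, 1, 1, 1],
--     ]
--
--     def mul(X, Y):
--         return [[sum(X[i][k] * Y[k][j] for k in range(6)) % P for j in range(6)]
--                 for i in range(6)]
--
--     def mat_pow(X, e):
--         if e == 0:
--             return [[1 if i == j else 0 for j in range(6)] for i in range(6)]
--         H = mat_pow(X, e // 2)
--         H2 = mul(H, H)
--         return H2 if e % 2 == 0 else mul(H2, X)
--
--     R = mat_pow(M, n - 1)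
--     w = [1, 2, 4, 8, 16, 32]
--     return sum(R[0][j] * w[j] for j in range(6)) % P
-- ===== Notes on version B (the rewrite author's own statement) =====
-- stated objective: faster
-- what changed: Replaced the O(n) tabulation of the 6-term recurrence by binary exponentiation of its 6x6 companion matrix mod 1e9+7, reading the answer off the first row applied to the seed vector (1,2,4,8,16,32).
import Mathlib
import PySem

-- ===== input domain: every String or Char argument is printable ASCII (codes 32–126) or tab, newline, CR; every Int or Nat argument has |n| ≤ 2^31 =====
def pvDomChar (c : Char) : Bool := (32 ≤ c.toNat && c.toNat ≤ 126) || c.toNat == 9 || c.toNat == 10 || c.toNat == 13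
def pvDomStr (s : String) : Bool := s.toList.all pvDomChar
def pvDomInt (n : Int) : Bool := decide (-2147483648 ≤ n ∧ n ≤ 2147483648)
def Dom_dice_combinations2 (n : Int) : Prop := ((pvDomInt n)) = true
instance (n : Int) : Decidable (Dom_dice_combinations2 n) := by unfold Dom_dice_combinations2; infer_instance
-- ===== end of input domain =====

-- B replaces A's O(n) tabulation of the 6-term recurrence by O(log n) binary
-- exponentiation of its 6x6 companion matrix mod 1e9+7 (objective: faster, asymptotic).

def pvP : Int := 1000000007

-- ===== PORT A =====
-- one loop iteration: body of 'for i in range(n)'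
def pvAStep (arr : List Int) (i : Nat) : List Int :=
  if i ≤ 5 then arr.set i (2 ^ i)
  else arr.set i ((arr.getD (i-1) 0 + arr.getD (i-2) 0 + arr.getD (i-3) 0
      + arr.getD (i-4) 0 + arr.getD (i-5) 0 + arr.getD (i-6) 0) % pvP)

def dice_combinations2 (n : Int) : Int :=
  let array := List.replicate n.toNat 0          -- [0] * n
  let array := (List.range n.toNat).foldl pvAStep array
  (PySem.List.pyGet? array (-1)).getD 0          -- array[-1]; none (IndexError) only outside Pre_

-- ===== PORT B =====
-- mul(X, Y): 6x6 matrix product mod P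
def pvMul6 (X Y : List (List Int)) : List (List Int) :=
  (List.range 6).map fun i => (List.range 6).map fun j =>
    (((List.range 6).map fun k => (X.getD i []).getD k 0 * (Y.getD k []).getD j 0).sum) % pvP

-- identity matrix built in mat_pow's base case
def pvId6 : List (List Int) :=
  (List.range 6).map fun i => (List.range 6).map fun j => if i = j then (1 : Int) else 0

-- mat_pow(X, e): binary exponentiation (Python recurses on e // 2)
def pvMatPow (X : List (List Int)) (e : Nat) : List (List Int) :=
  if h : e = 0 then pvId6
  else
    let H := pvMatPow X (e / 2)
    let H2 := pvMul6 H H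
    if e % 2 = 0 then H2 else pvMul6 H2 X
decreasing_by exact Nat.div_lt_self (Nat.pos_of_ne_zero h) (by norm_num)

-- companion matrix M of the recurrence
def pvM6 : List (List Int) :=
  [[0,1,0,0,0,0],[0,0,1,0,0,0],[0,0,0,1,0,0],[0,0,0,0,1,0],[0,0,0,0,0,1],[1,1,1,1,1,1]]

def dice_combinations2_alt (n : Int) : Int :=
  let R := pvMatPow pvM6 (n - 1).toNat
  let w : List Int := [1, 2, 4, 8, 16, 32]
  (((List.range 6).map fun j => (R.getD 0 []).getD j 0 * w.getD j 0).sum) % pvP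

-- ===== PRECONDITION & SPEC =====
-- A evaluates array[-1] of an array of length n: IndexError for every n < 1 (B's
-- recursion on n - 1 also fails to terminate there), so Pre_ excludes exactly n < 1.
def Pre_dice_combinations2 (n : Int) : Prop := 1 ≤ n
instance (n : Int) : Decidable (Pre_dice_combinations2 n) := by unfold Pre_dice_combinations2; infer_instance
def pvWitness_dice_combinations2 : Int := 3

def Spec_dice_combinations2 (n : Int) (out : Int) : Prop := out = dice_combinations2_alt n
instance (n : Int) (out : Int) : Decidable (Spec_dice_combinations2 n out) := by unfold Spec_dice_combinations2; infer_instance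

-- ===== CLAIM (what is proved, stated in full; the proofs are below) =====
def Claim_equal_dice_combinations2 : Prop := ∀ (n : Int), Dom_dice_combinations2 n → Pre_dice_combinations2 n → Spec_dice_combinations2 n (dice_combinations2 n)

-- ===== LEMMAS AND PROOFS =====

-- the sequence A tabulates
def pvF (i : Nat) : Int :=
  if h : i ≤ 5 then 2 ^ i
  else (pvF (i-1) + pvF (i-2) + pvF (i-3) + pvF (i-4) + pvF (i-5) + pvF (i-6)) % pvP
decreasing_by all_goals omega

def pvPN : Nat := 1000000007

lemma pvP_cast : ((pvPN : Nat) : Int) = pvP := rfl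

lemma pvP_pos : (0 : Int) < pvP := by norm_num [pvP]

lemma pvF_range (i : Nat) : 0 ≤ pvF i ∧ pvF i < pvP := by
  by_cases h : i ≤ 5
  · rw [pvF, dif_pos h]
    interval_cases i <;> norm_num [pvP]
  · rw [pvF, dif_neg h]
    exact ⟨Int.emod_nonneg _ (by norm_num [pvP]), Int.emod_lt_of_pos _ pvP_pos⟩

-- ===== A-side: the loop tabulates pvF =====

lemma pvA_inv (N m : Nat) (hm : m ≤ N) :
    ((List.range m).foldl pvAStep (List.replicate N 0)).length = N ∧
    ∀ j, j < N → ((List.range m).foldl pvAStep (List.replicate N 0)).getD j 0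
      = if j < m then pvF j else 0 := by
  induction m with
  | zero =>
    simp [List.getD_eq_getElem?_getD]
  | succ m ih =>
    obtain ⟨hlen, hval⟩ := ih (by omega)
    rw [List.range_succ, List.foldl_append]
    set L := (List.range m).foldl pvAStep (List.replicate N 0) with hL
    have hmN : m < N := by omega
    have hset : ∀ (x : Int) j, j < N →
        (L.set m x).getD j 0 = if j = m then x else L.getD j 0 := by
      intro x j hj
      by_cases hjm : j = m
      · subst hjm
        simp [List.getD_eq_getElem?_getD, hlen, hj]
      · rw [List.getD_eq_getElem?_getD, List.getD_eq_getElem?_getD,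
          List.getElem?_set_ne (show m ≠ j by omega), if_neg hjm]
    have hnew : List.foldl pvAStep L [m] = L.set m (pvF m) := by
      by_cases h5 : m ≤ 5
      · simp only [List.foldl_cons, List.foldl_nil, pvAStep, if_pos h5]
        rw [pvF, dif_pos h5]
      · simp only [List.foldl_cons, List.foldl_nil, pvAStep, if_neg h5]
        have e1 : L.getD (m-1) 0 = pvF (m-1) := by rw [hval _ (by omega), if_pos (by omega)]
        have e2 : L.getD (m-2) 0 = pvF (m-2) := by rw [hval _ (by omega), if_pos (by omega)]
        have e3 : L.getD (m-3) 0 = pvF (m-3) := by rw [hval _ (by omega), if_pos (by omega)]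
        have e4 : L.getD (m-4) 0 = pvF (m-4) := by rw [hval _ (by omega), if_pos (by omega)]
        have e5 : L.getD (m-5) 0 = pvF (m-5) := by rw [hval _ (by omega), if_pos (by omega)]
        have e6 : L.getD (m-6) 0 = pvF (m-6) := by rw [hval _ (by omega), if_pos (by omega)]
        rw [e1, e2, e3, e4, e5, e6]
        conv_rhs => rw [pvF, dif_neg h5]
    rw [hnew]
    refine ⟨by simp [hlen], ?_⟩
    intro j hj
    rw [hset _ j hj]
    by_cases hjm : j = m
    · subst hjm
      rw [if_pos rfl, if_pos (by omega)]
    · rw [if_neg hjm, hval j hj]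
      by_cases hjm' : j < m
      · rw [if_pos hjm', if_pos (by omega)]
      · rw [if_neg hjm', if_neg (by omega)]

lemma pvA_eq (n : Int) (hn : 1 ≤ n) : dice_combinations2 n = pvF (n.toNat - 1) := by
  have hN : 1 ≤ n.toNat := by omega
  obtain ⟨hlen, hval⟩ := pvA_inv n.toNat n.toNat le_rfl
  show (PySem.List.pyGet? ((List.range n.toNat).foldl pvAStep
      (List.replicate n.toNat 0)) (-1)).getD 0 = pvF (n.toNat - 1)
  rw [PySem.List.pyGet?_neg_one]
  set L := (List.range n.toNat).foldl pvAStep (List.replicate n.toNat 0) with hL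
  have hne : L ≠ [] := by
    intro h; rw [h] at hlen; simp at hlen; omega
  rw [List.getLast?_eq_getElem?]
  have hlt : L.length - 1 < n.toNat := by omega
  have := hval (L.length - 1) hlt
  rw [List.getD_eq_getElem?_getD] at this
  rw [hlen] at this ⊢
  rw [this, if_pos (by omega)]

-- ===== B-side: matrix exponentiation over ZMod computes pvF =====

def pvToMat (X : List (List Int)) : Matrix (Fin 6) (Fin 6) (ZMod pvPN) :=
  fun i j => (((X.getD i.val []).getD j.val 0 : Int) : ZMod pvPN)

def pvFz (i : Nat) : ZMod pvPN := ((pvF i : Int) : ZMod pvPN)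

def pvVec (k : Nat) : Fin 6 → ZMod pvPN := fun j => pvFz (k + j.val)

lemma getD_mapRange6 {α : Type} (f : Nat → α) (d : α) (j : Nat) (hj : j < 6) :
    ((List.range 6).map f).getD j d = f j := by
  rw [List.getD_eq_getElem?_getD, List.getElem?_map]
  simp [hj]

lemma cast_mod_p (a : Int) : (((a % pvP : Int)) : ZMod pvPN) = (a : ZMod pvPN) := by
  rw [← pvP_cast]
  exact ZMod.intCast_mod a pvPN

lemma pvToMat_mul (X Y : List (List Int)) :
    pvToMat (pvMul6 X Y) = pvToMat X * pvToMat Y := by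
  ext i j
  rw [Matrix.mul_apply, Fin.sum_univ_six]
  unfold pvToMat pvMul6
  rw [getD_mapRange6 _ _ i.val i.isLt, getD_mapRange6 _ _ j.val j.isLt]
  rw [show List.range 6 = [0,1,2,3,4,5] from rfl]
  simp only [List.map_cons, List.map_nil, List.sum_cons, List.sum_nil]
  rw [cast_mod_p]
  push_cast
  simp only [show ((0:Fin 6):Nat) = 0 from rfl, show ((1:Fin 6):Nat) = 1 from rfl,
    show ((2:Fin 6):Nat) = 2 from rfl, show ((3:Fin 6):Nat) = 3 from rfl,
    show ((4:Fin 6):Nat) = 4 from rfl, show ((5:Fin 6):Nat) = 5 from rfl]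
  ring

lemma pvToMat_id : pvToMat pvId6 = 1 := by
  ext i j
  unfold pvToMat pvId6
  rw [getD_mapRange6 _ _ i.val i.isLt, getD_mapRange6 _ _ j.val j.isLt]
  rw [Matrix.one_apply]
  by_cases h : i = j
  · rw [if_pos h, if_pos (by rw [h])]; norm_num
  · rw [if_neg h, if_neg (by intro hv; exact h (Fin.ext hv))]; norm_num

lemma pvToMat_pow (X : List (List Int)) (e : Nat) :
    pvToMat (pvMatPow X e) = (pvToMat X) ^ e := by
  induction e using Nat.strong_induction_on with
  | _ e ih =>
    rw [pvMatPow]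
    by_cases h : e = 0
    · rw [dif_pos h, h, pow_zero, pvToMat_id]
    · rw [dif_neg h]
      have ih2 := ih (e / 2) (Nat.div_lt_self (Nat.pos_of_ne_zero h) (by norm_num))
      by_cases h2 : e % 2 = 0
      · rw [if_pos h2, pvToMat_mul, ih2, ← pow_add]
        congr 1
        omega
      · rw [if_neg h2, pvToMat_mul, pvToMat_mul, ih2, ← pow_add, ← pow_succ]
        congr 1
        omega

lemma pvFz_six (k : Nat) : pvFz (k + 6) = pvFz k + pvFz (k+1) + pvFz (k+2)
    + pvFz (k+3) + pvFz (k+4) + pvFz (k+5) := by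
  unfold pvFz
  conv_lhs => rw [pvF, dif_neg (show ¬ k + 6 ≤ 5 by omega)]
  simp only [show k+6-1 = k+5 from by omega, show k+6-2 = k+4 from by omega,
    show k+6-3 = k+3 from by omega, show k+6-4 = k+2 from by omega,
    show k+6-5 = k+1 from by omega, show k+6-6 = k from by omega]
  rw [cast_mod_p]
  push_cast
  ring

lemma pvStep_vec (k : Nat) : (pvToMat pvM6).mulVec (pvVec k) = pvVec (k + 1) := by
  funext i
  rw [Matrix.mulVec, dotProduct, Fin.sum_univ_six]
  fin_cases i
  · simp [pvToMat, pvM6, pvVec, List.getD_eq_getElem?_getD]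
  · simp [pvToMat, pvM6, pvVec, List.getD_eq_getElem?_getD]
  · simp [pvToMat, pvM6, pvVec, List.getD_eq_getElem?_getD]
  · simp [pvToMat, pvM6, pvVec, List.getD_eq_getElem?_getD]
  · simp [pvToMat, pvM6, pvVec, List.getD_eq_getElem?_getD]
  · simp only [pvToMat, pvM6, pvVec, List.getD_eq_getElem?_getD]
    norm_num
    have h6 : pvFz (k + 1 + 5) = pvFz k + pvFz (k+1) + pvFz (k+2)
        + pvFz (k+3) + pvFz (k+4) + pvFz (k+5) := by
      rw [show k + 1 + 5 = k + 6 from by omega]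
      exact pvFz_six k
    exact h6.symm

lemma pvPow_vec (e k : Nat) : ((pvToMat pvM6) ^ e).mulVec (pvVec k) = pvVec (k + e) := by
  induction e generalizing k with
  | zero => rw [pow_zero, Matrix.one_mulVec, Nat.add_zero]
  | succ e ih =>
    rw [pow_succ', ← Matrix.mulVec_mulVec, ih, pvStep_vec, Nat.add_assoc]

lemma pvB_cast (n : Int) :
    ((dice_combinations2_alt n : Int) : ZMod pvPN) = pvFz ((n - 1).toNat) := by
  unfold dice_combinations2_alt
  rw [show List.range 6 = [0,1,2,3,4,5] from rfl]
  simp only [List.map_cons, List.map_nil, List.sum_cons, List.sum_nil]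
  rw [cast_mod_p]
  push_cast
  simp only [show ([1,2,4,8,16,32] : List Int).getD 0 0 = 1 from rfl,
    show ([1,2,4,8,16,32] : List Int).getD 1 0 = 2 from rfl,
    show ([1,2,4,8,16,32] : List Int).getD 2 0 = 4 from rfl,
    show ([1,2,4,8,16,32] : List Int).getD 3 0 = 8 from rfl,
    show ([1,2,4,8,16,32] : List Int).getD 4 0 = 16 from rfl,
    show ([1,2,4,8,16,32] : List Int).getD 5 0 = 32 from rfl]
  have hrow : ∀ j : Fin 6,
      ((((pvMatPow pvM6 (n-1).toNat).getD 0 []).getD j.val 0 : Int) : ZMod pvPN)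
        = ((pvToMat pvM6) ^ (n-1).toNat) 0 j := by
    intro j
    rw [← pvToMat_pow]
    rfl
  have h0 : (((pvMatPow pvM6 (n-1).toNat).getD 0 []).getD 0 0 : ZMod pvPN)
      = ((pvToMat pvM6) ^ (n-1).toNat) 0 0 := hrow 0
  have h1 : (((pvMatPow pvM6 (n-1).toNat).getD 0 []).getD 1 0 : ZMod pvPN)
      = ((pvToMat pvM6) ^ (n-1).toNat) 0 1 := hrow 1
  have h2 : (((pvMatPow pvM6 (n-1).toNat).getD 0 []).getD 2 0 : ZMod pvPN)
      = ((pvToMat pvM6) ^ (n-1).toNat) 0 2 := hrow 2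
  have h3 : (((pvMatPow pvM6 (n-1).toNat).getD 0 []).getD 3 0 : ZMod pvPN)
      = ((pvToMat pvM6) ^ (n-1).toNat) 0 3 := hrow 3
  have h4 : (((pvMatPow pvM6 (n-1).toNat).getD 0 []).getD 4 0 : ZMod pvPN)
      = ((pvToMat pvM6) ^ (n-1).toNat) 0 4 := hrow 4
  have h5 : (((pvMatPow pvM6 (n-1).toNat).getD 0 []).getD 5 0 : ZMod pvPN)
      = ((pvToMat pvM6) ^ (n-1).toNat) 0 5 := hrow 5
  rw [h0, h1, h2, h3, h4, h5]
  have hvec := congrFun (pvPow_vec ((n-1).toNat) 0) (0 : Fin 6)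
  rw [Matrix.mulVec, dotProduct, Fin.sum_univ_six] at hvec
  have hw : ∀ j : Fin 6, pvVec 0 j = ((2 ^ (j.val) : Int) : ZMod pvPN) := by
    intro j
    unfold pvVec pvFz
    rw [Nat.zero_add, pvF, dif_pos (by omega)]
  have hw0 : pvVec 0 (0 : Fin 6) = (1 : ZMod pvPN) := by rw [hw 0]; norm_num
  have hw1 : pvVec 0 (1 : Fin 6) = (2 : ZMod pvPN) := by rw [hw 1]; norm_num
  have hw2 : pvVec 0 (2 : Fin 6) = (4 : ZMod pvPN) := by rw [hw 2]; norm_num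
  have hw3 : pvVec 0 (3 : Fin 6) = (8 : ZMod pvPN) := by rw [hw 3]; norm_num
  have hw4 : pvVec 0 (4 : Fin 6) = (16 : ZMod pvPN) := by rw [hw 4]; norm_num
  have hw5 : pvVec 0 (5 : Fin 6) = (32 : ZMod pvPN) := by rw [hw 5]; norm_num
  rw [hw0, hw1, hw2, hw3, hw4, hw5] at hvec
  have hr : pvVec (0 + (n-1).toNat) (0 : Fin 6) = pvFz ((n-1).toNat) := by
    unfold pvVec
    norm_num
  rw [hr] at hvec
  linear_combination hvec

lemma pvInt_eq_of_cast (x y : Int) (hx0 : 0 ≤ x) (hx1 : x < pvP) (hy0 : 0 ≤ y)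
    (hy1 : y < pvP) (h : (x : ZMod pvPN) = (y : ZMod pvPN)) : x = y := by
  rw [ZMod.intCast_eq_intCast_iff'] at h
  rw [pvP_cast] at h
  rwa [Int.emod_eq_of_lt hx0 hx1, Int.emod_eq_of_lt hy0 hy1] at h

-- ===== VERDICT (by name: the statement is the Claim_ definition above) =====
theorem dice_combinations2_spec : Claim_equal_dice_combinations2 := by
  intro n _ hpre
  show dice_combinations2 n = dice_combinations2_alt n
  have hA := pvA_eq n hpre
  have hB := pvB_cast n
  have hidx : (n - 1).toNat = n.toNat - 1 := by omega
  have hFr := pvF_range (n.toNat - 1)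
  have hBr : 0 ≤ dice_combinations2_alt n ∧ dice_combinations2_alt n < pvP := by
    unfold dice_combinations2_alt
    exact ⟨Int.emod_nonneg _ (by norm_num [pvP]), Int.emod_lt_of_pos _ pvP_pos⟩
  apply pvInt_eq_of_cast _ _ (hA ▸ hFr.1) (hA ▸ hFr.2) hBr.1 hBr.2
  rw [hA, hB, hidx]
  rfl
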